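-- pv_equiv track=rewrite | github.com/1xiaosongz/lll | 5860.py | remove_elements_recursive_with_deleted
-- ===== SOURCE A (Python) =====
-- def remove_elements_recursive_with_deleted(arr, deleted=None):
--     """
--     递归版本，同时记录被删除的元素
--     """
--     if deleted is None:
--         deleted = []
--
--     for i in range(len(arr) - 1):
--         if arr[i + 1] - arr[i] <= 500:
--             # 记录被删除的元素
--             deleted.append(arr[i + 1])
--             # 删除后一个元素并递归调用
--             new_arr = arr[:i + 1] + arr[i + 2:]
--             return remove_elements_recursive_with_deleted(new_arr, deleted)
--     return arr, deleted
-- ===== SOURCE B (Python) =====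
-- def remove_elements_recursive_with_deleted(arr, deleted=None):
--     """Single forward pass: keep an element only if it exceeds the last kept one by more than 500."""
--     if deleted is None:
--         deleted = []
--     if not arr:
--         return arr, deleted
--     kept = [arr[0]]
--     for x in arr[1:]:
--         if x - kept[-1] <= 500:
--             deleted.append(x)
--         else:
--             kept.append(x)
--     return kept, deleted
-- ===== Notes on version B (the rewrite author's own statement) =====
-- stated objective: faster
-- what changed: Replaced the restart-and-rescan recursion with list slicing by a single forward pass that keeps an element iff it exceeds the last kept element by more than 500, collecting deletions as it goes.
import Mathlib
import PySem

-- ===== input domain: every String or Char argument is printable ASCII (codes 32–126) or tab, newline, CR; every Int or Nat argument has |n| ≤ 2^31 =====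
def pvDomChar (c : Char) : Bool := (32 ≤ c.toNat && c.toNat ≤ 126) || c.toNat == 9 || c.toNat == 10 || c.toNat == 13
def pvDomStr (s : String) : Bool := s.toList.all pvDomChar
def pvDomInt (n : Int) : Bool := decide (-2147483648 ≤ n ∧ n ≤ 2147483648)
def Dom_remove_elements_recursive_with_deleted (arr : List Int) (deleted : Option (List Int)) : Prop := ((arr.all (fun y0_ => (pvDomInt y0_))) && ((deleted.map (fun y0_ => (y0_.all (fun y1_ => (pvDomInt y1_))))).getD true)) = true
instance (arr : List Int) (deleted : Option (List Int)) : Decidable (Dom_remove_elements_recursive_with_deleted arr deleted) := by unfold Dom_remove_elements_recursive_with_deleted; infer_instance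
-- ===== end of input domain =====

-- B replaces A's restart-and-rescan recursion (rebuilding the list by slicing on each
-- deletion) with one forward pass tracking the last kept element; equivalence is about the
-- RETURN value (both Pythons append to a caller-supplied `deleted` list in place alike).

-- ===== PORT A =====
-- the `for i in range(len(arr) - 1)` loop with its early return; indices produced by
-- range are nonnegative and in range, so Nat indexing via pyGetD with casts is exact
def pvA_loop (arr : List Int) : List Nat → Option Nat
  | [] => none
  | i :: is =>
    if PySem.List.pyGetD arr ((i : Int) + 1) 0 - PySem.List.pyGetD arr (i : Int) 0 ≤ 500 then
      some i
    else pvA_loop arr is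

def pvA_find (arr : List Int) : Option Nat := pvA_loop arr (List.range (arr.length - 1))

-- termination fact the recursive port cites: the index found lies inside range(len-1)
theorem pvA_loop_mem {arr : List Int} {l : List Nat} {i : Nat} (h : pvA_loop arr l = some i) :
    i ∈ l := by
  induction l with
  | nil => simp [pvA_loop] at h
  | cons j js ih =>
    simp only [pvA_loop] at h
    split at h
    · cases h; exact List.mem_cons_self
    · exact List.mem_cons_of_mem _ (ih h)

theorem pvA_find_lt {arr : List Int} {i : Nat} (h : pvA_find arr = some i) :
    i + 1 < arr.length := by
  have := pvA_loop_mem h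
  have := List.mem_range.mp this
  omega

def pvA_go (arr d : List Int) : List Int × List Int :=
  match hf : pvA_find arr with
  | none => (arr, d)
  | some i =>
    -- new_arr = arr[:i+1] + arr[i+2:], deleted.append(arr[i+1])
    pvA_go (PySem.List.slice arr none (some ((i : Int) + 1)) ++
            PySem.List.slice arr (some ((i : Int) + 2)) none)
           (d ++ [PySem.List.pyGetD arr ((i : Int) + 1) 0])
termination_by arr.length
decreasing_by
  have hlt := pvA_find_lt hf
  have h1 : ((i : Int) + 1) = ((i + 1 : Nat) : Int) := by push_cast; ring
  have h2 : ((i : Int) + 2) = ((i + 2 : Nat) : Int) := by push_cast; ring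
  rw [h1, h2, PySem.List.slice_to_natCast, PySem.List.slice_from_natCast]
  simp [List.length_append, List.length_take, List.length_drop]
  omega

def remove_elements_recursive_with_deleted (arr : List Int) (deleted : Option (List Int)) : List Int × List Int :=
  let d := deleted.getD []   -- if deleted is None: deleted = []
  pvA_go arr d

-- ===== PORT B =====
-- the `for x in arr[1:]` loop of Source B; state = (kept, deleted), kept[-1] via pyGetD
def pvB_loop (kept d : List Int) : List Int → List Int × List Int
  | [] => (kept, d)
  | x :: rest =>
    if x - PySem.List.pyGetD kept (-1) 0 ≤ 500 then
      pvB_loop kept (d ++ [x]) rest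
    else
      pvB_loop (kept ++ [x]) d rest

def remove_elements_recursive_with_deleted_alt (arr : List Int) (deleted : Option (List Int)) : List Int × List Int :=
  let d := deleted.getD []
  match arr with
  | [] => (arr, d)
  | a :: rest => pvB_loop [a] d rest   -- kept = [arr[0]], then scan arr[1:]

-- ===== PRECONDITION & SPEC =====
def Spec_remove_elements_recursive_with_deleted (arr : List Int) (deleted : Option (List Int)) (out : List Int × List Int) : Prop := out = remove_elements_recursive_with_deleted_alt arr deleted
instance (arr : List Int) (deleted : Option (List Int)) (out : List Int × List Int) : Decidable (Spec_remove_elements_recursive_with_deleted arr deleted out) := by unfold Spec_remove_elements_recursive_with_deleted; infer_instance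

-- ===== CLAIM (what is proved, stated in full; the proofs are below) =====
def Claim_equal_remove_elements_recursive_with_deleted : Prop := ∀ (arr : List Int) (deleted : Option (List Int)), Dom_remove_elements_recursive_with_deleted arr deleted → Spec_remove_elements_recursive_with_deleted arr deleted (remove_elements_recursive_with_deleted arr deleted)

-- ===== LEMMAS AND PROOFS =====

-- reference function: result of the whole process starting after last kept element `a`
def pvG (a : Int) : List Int → List Int × List Int
  | [] => ([], [])
  | x :: rest =>
    if x - a ≤ 500 then ((pvG a rest).1, x :: (pvG a rest).2)
    else (x :: (pvG x rest).1, (pvG x rest).2)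

def pvFull : List Int → List Int × List Int
  | [] => ([], [])
  | a :: rest => (a :: (pvG a rest).1, (pvG a rest).2)

-- structural version of A's scan for the first adjacent pair with gap ≤ 500
def pvSfind : List Int → Option Nat
  | [] => none
  | [_] => none
  | a :: x :: rest =>
    if x - a ≤ 500 then some 0 else (pvSfind (x :: rest)).map (· + 1)

theorem pvPyGetD_cons_succNat (a : Int) (t : List Int) (n : Nat) :
    PySem.List.pyGetD (a :: t) ((n : Int) + 1) 0 = PySem.List.pyGetD t (n : Int) 0 := by
  have h : ((n : Int) + 1) = ((n + 1 : Nat) : Int) := by push_cast; ring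
  rw [h, PySem.List.pyGetD_natCast, PySem.List.pyGetD_natCast]
  simp [List.getD]

theorem pvA_loop_map_succ (a : Int) (t : List Int) (l : List Nat) :
    pvA_loop (a :: t) (l.map (· + 1)) = (pvA_loop t l).map (· + 1) := by
  induction l with
  | nil => simp [pvA_loop]
  | cons j js ih =>
    simp only [List.map_cons, pvA_loop]
    have e1 : PySem.List.pyGetD (a :: t) (((j + 1 : Nat) : Int) + 1) 0
        = PySem.List.pyGetD t ((j : Int) + 1) 0 := by
      rw [pvPyGetD_cons_succNat a t (j + 1)]
      push_cast
      ring_nf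
    have e2 : PySem.List.pyGetD (a :: t) ((j + 1 : Nat) : Int) 0
        = PySem.List.pyGetD t ((j : Int)) 0 := by
      have h : ((j + 1 : Nat) : Int) = ((j : Int) + 1) := by push_cast; ring
      rw [h, pvPyGetD_cons_succNat a t j]
    rw [e1, e2]
    split_ifs <;> simp [ih]

theorem pvA_find_eq_sfind (arr : List Int) : pvA_find arr = pvSfind arr := by
  induction arr with
  | nil => simp [pvA_find, pvA_loop, pvSfind]
  | cons a t ih =>
    cases t with
    | nil => simp [pvA_find, pvA_loop, pvSfind]
    | cons x r =>
      simp only [pvA_find, pvSfind]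
      have hlen : (a :: x :: r).length - 1 = r.length + 1 := by simp
      rw [hlen, List.range_succ_eq_map]
      simp only [pvA_loop]
      rw [pvPyGetD_cons_succNat a (x :: r) 0]
      have hx : PySem.List.pyGetD (x :: r) ((0 : Nat) : Int) 0 = x := by simp
      have ha : PySem.List.pyGetD (a :: x :: r) ((0 : Nat) : Int) 0 = a := by simp
      rw [hx, ha]
      by_cases hc : x - a ≤ 500
      · simp [hc]
      · rw [if_neg hc, if_neg hc]
        have hsucc : Nat.succ = (· + 1) := funext fun n => rfl
        rw [hsucc, pvA_loop_map_succ]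
        have hr : List.range r.length = List.range ((x :: r).length - 1) := by simp
        rw [hr, ← pvA_find, ih]

theorem pvSfind_none_G {rest : List Int} : ∀ {a : Int}, pvSfind (a :: rest) = none → pvG a rest = (rest, []) := by
  induction rest with
  | nil => intro a _; simp [pvG]
  | cons x r ih =>
    intro a h
    simp only [pvSfind] at h
    by_cases hc : x - a ≤ 500
    · simp [hc] at h
    · simp only [if_neg hc, Option.map_eq_none_iff] at h
      simp [pvG, hc, ih h]

theorem pvG_step : ∀ (rest : List Int) (a : Int) (i : Nat), pvSfind (a :: rest) = some i →
    pvG a rest = ((pvG a (rest.take i ++ rest.drop (i + 1))).1,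
                   rest.getD i 0 :: (pvG a (rest.take i ++ rest.drop (i + 1))).2) := by
  intro rest
  induction rest with
  | nil => intro a i h; simp [pvSfind] at h
  | cons x r ih =>
    intro a i h
    simp only [pvSfind] at h
    by_cases hc : x - a ≤ 500
    · simp only [if_pos hc, Option.some.injEq] at h
      subst h
      simp [pvG, hc]
    · simp only [if_neg hc, Option.map_eq_some_iff] at h
      obtain ⟨j, hj, hji⟩ := h
      subst hji
      have hIH := ih x j hj
      simp only [List.take_succ_cons, List.drop_succ_cons, List.cons_append]
      simp [pvG, hc, hIH]

theorem pvA_go_eq_full : ∀ (arr d : List Int), pvA_go arr d = ((pvFull arr).1, d ++ (pvFull arr).2) := by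
  intro arr d
  induction arr, d using pvA_go.induct with
  | case1 arr d hf =>
    rw [pvA_go]
    rw [hf]
    rw [pvA_find_eq_sfind] at hf
    cases arr with
    | nil => simp [pvFull]
    | cons a rest =>
      have := pvSfind_none_G hf
      simp [pvFull, this]
  | case2 arr d i hf ih =>
    rw [pvA_go, hf]
    split
    next heq => exact absurd heq (by simp)
    next i' heq =>
    injection heq with heq'
    subst heq'
    rw [ih]
    have hlt := pvA_find_lt hf
    rw [pvA_find_eq_sfind] at hf
    cases arr with
    | nil => simp [pvSfind] at hf
    | cons a rest =>
      have h1 : ((i : Int) + 1) = ((i + 1 : Nat) : Int) := by push_cast; ring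
      have h2 : ((i : Int) + 2) = ((i + 2 : Nat) : Int) := by push_cast; ring
      rw [show PySem.List.slice (a :: rest) none (some ((i : Int) + 1)) = List.take (i + 1) (a :: rest) from by
            rw [h1, PySem.List.slice_to_natCast],
          show PySem.List.slice (a :: rest) (some ((i : Int) + 2)) none = List.drop (i + 2) (a :: rest) from by
            rw [h2, PySem.List.slice_from_natCast]]
      have hstep := pvG_step rest a i hf
      have htd : (a :: rest).take (i + 1) ++ (a :: rest).drop (i + 2) =
          a :: (rest.take i ++ rest.drop (i + 1)) := by
        simp [List.take_succ_cons, List.drop_succ_cons]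
      rw [htd]
      have hy : PySem.List.pyGetD (a :: rest) ((i : Int) + 1) 0 = rest.getD i 0 := by
        rw [pvPyGetD_cons_succNat a rest i, PySem.List.pyGetD_natCast]
      rw [hy]
      simp [pvFull, hstep]

theorem pvB_last (kept : List Int) (h : kept ≠ []) :
    PySem.List.pyGetD kept (-1) 0 = kept.getLastD 0 := by
  rw [PySem.List.pyGetD_neg_one kept 0 h]
  cases kept with
  | nil => simp at h
  | cons a t => simp [List.getLastD_eq_getLast?, List.getLast?_eq_some_getLast]

theorem pvB_loop_eq : ∀ (rest kept d : List Int), kept ≠ [] →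
    pvB_loop kept d rest = (kept ++ (pvG (kept.getLastD 0) rest).1, d ++ (pvG (kept.getLastD 0) rest).2) := by
  intro rest
  induction rest with
  | nil => intro kept d _; simp [pvB_loop, pvG]
  | cons x r ih =>
    intro kept d h
    simp only [pvB_loop, pvB_last kept h]
    by_cases hc : x - kept.getLastD 0 ≤ 500
    · rw [if_pos hc, ih kept (d ++ [x]) h]
      simp only [pvG, if_pos hc]
      simp
    · rw [if_neg hc, ih (kept ++ [x]) d (by simp)]
      have hl : (kept ++ [x]).getLastD 0 = x := by simp
      rw [hl]
      simp only [pvG, if_neg hc]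
      simp

-- ===== VERDICT (by name: the statement is the Claim_ definition above) =====
theorem remove_elements_recursive_with_deleted_spec : Claim_equal_remove_elements_recursive_with_deleted := by
  intro arr deleted _
  unfold Spec_remove_elements_recursive_with_deleted
  unfold remove_elements_recursive_with_deleted remove_elements_recursive_with_deleted_alt
  cases arr with
  | nil => simp [pvA_go_eq_full, pvFull]
  | cons a rest =>
    simp only []
    rw [pvA_go_eq_full, pvB_loop_eq rest [a] _ (by simp)]
    simp [pvFull]
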